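-- pv_equiv track=rewrite | github.com/junwson9/algorithm | 프로그래머스/1/1845. 폰켓몬/폰켓몬.py | solution
-- ===== SOURCE A (Python) =====
-- def solution(nums):
--     n = len(nums)//2
--     nums = list(set(nums))
--     tmp = []
--     for i in nums:
--         if i not in tmp:
--             tmp.append(i)
--     if len(tmp) > n:
--         answer = n
--     else:
--         answer = len(tmp)
--     return answer
-- ===== SOURCE B (Python) =====
-- def solution(nums):
--     s = sorted(nums)
--     count = 0 if not s else 1 + sum(1 for a, b in zip(s, s[1:]) if a != b)
--     return min(len(nums) // 2, count)
-- ===== Notes on version B (the rewrite author's own statement) =====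
-- stated objective: faster
-- what changed: Counts distinct values by sorting once and counting adjacent inequalities in a single zip pass, instead of A's set conversion followed by a quadratic membership-test dedup loop.
import Mathlib
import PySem

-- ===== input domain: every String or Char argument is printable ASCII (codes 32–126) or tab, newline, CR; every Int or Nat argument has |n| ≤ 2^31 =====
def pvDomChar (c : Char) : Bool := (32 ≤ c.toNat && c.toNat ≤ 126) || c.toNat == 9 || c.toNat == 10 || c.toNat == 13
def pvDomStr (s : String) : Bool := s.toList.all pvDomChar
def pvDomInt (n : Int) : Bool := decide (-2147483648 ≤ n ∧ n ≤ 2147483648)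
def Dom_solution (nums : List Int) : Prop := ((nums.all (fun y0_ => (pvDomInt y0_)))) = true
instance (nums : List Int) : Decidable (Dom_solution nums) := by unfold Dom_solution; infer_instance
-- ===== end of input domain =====

-- B counts distinct values by sorting and one adjacent-comparison pass instead of A's set plus quadratic membership loop; objective: alternative.

-- ===== PORT A =====
def solution (nums : List Int) : Int :=
  let n : Int := PySem.Int.floordiv (nums.length : Int) 2
  let nums2 : List Int := PySem.Set.ofList nums     -- list(set(nums)); only its length is used, so set order is irrelevant
  let tmp : List Int := nums2.foldl (fun tmp i => if tmp.contains i then tmp else tmp ++ [i]) []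
  if (tmp.length : Int) > n then n else (tmp.length : Int)

-- ===== PORT B =====
def solution_alt (nums : List Int) : Int :=
  let s : List Int := PySem.List.sorted nums (fun x => x) false
  let count : Int := if s.isEmpty then 0 else 1 + ((s.zip (s.drop 1)).countP (fun p => p.1 != p.2) : Int)
  min (PySem.Int.floordiv (nums.length : Int) 2) count

-- ===== PRECONDITION & SPEC =====
def Spec_solution (nums : List Int) (out : Int) : Prop := out = solution_alt nums
instance (nums : List Int) (out : Int) : Decidable (Spec_solution nums out) := by unfold Spec_solution; infer_instance

-- ===== CLAIM (what is proved, stated in full; the proofs are below) =====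
def Claim_equal_solution : Prop := ∀ (nums : List Int), Dom_solution nums → Spec_solution nums (solution nums)

-- ===== LEMMAS AND PROOFS =====

-- A's inner loop is literally Set.ofList again
theorem tmp_loop_eq_ofList (l : List Int) :
    l.foldl (fun tmp i => if tmp.contains i then tmp else tmp ++ [i]) [] = PySem.Set.ofList l := by
  rfl

theorem ofList_toFinset (nums : List Int) :
    (PySem.Set.ofList nums).toFinset = nums.toFinset := by
  ext x
  simp [PySem.Set.mem_ofList]

theorem ofList_length_eq_card (nums : List Int) :
    (PySem.Set.ofList nums : List Int).length = nums.toFinset.card := by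
  rw [← ofList_toFinset]
  exact (List.toFinset_card_of_nodup (PySem.Set.nodup_ofList nums)).symm

-- adjacent-distinct count of a ≤-sorted list is the number of distinct elements
theorem adjCount_sorted (s : List Int) (hs : s.Pairwise (· ≤ ·)) :
    (if s.isEmpty then 0 else 1 + ((s.zip (s.drop 1)).countP (fun p => p.1 != p.2))) = s.toFinset.card := by
  induction s with
  | nil => simp
  | cons x t ih =>
    cases t with
    | nil => simp
    | cons y u =>
      have hp := hs
      rw [List.pairwise_cons] at hp
      obtain ⟨hx, ht⟩ := hp
      have ihv := ih ht
      simp only [List.isEmpty_cons] at ihv ⊢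
      by_cases hxy : x = y
      · subst hxy
        have hmem : x ∈ x :: u := List.mem_cons_self
        simp only [List.drop_succ_cons, List.drop_zero, List.zip_cons_cons, List.countP_cons] at ihv ⊢
        simp only [Bool.false_eq_true, if_false] at ihv ⊢
        simp only [bne_self_eq_false, Bool.false_eq_true, if_false]
        rw [List.toFinset_cons, Finset.insert_eq_self.mpr (by simp)]
        omega
      · have hxlt : ∀ z ∈ y :: u, x < z := by
          intro z hz
          have hyz : y ≤ z := by
            rcases List.mem_cons.mp hz with h | h
            · omega
            · exact (List.pairwise_cons.mp ht).1 z h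
          have := hx z hz
          have hxy' : x ≤ y := hx y List.mem_cons_self
          rcases List.mem_cons.mp hz with h | h
          · omega
          · have : x < y := lt_of_le_of_ne hxy' hxy
            omega
        have hnm : x ∉ y :: u := fun h => lt_irrefl x (hxlt x h)
        simp only [List.drop_succ_cons, List.drop_zero, List.zip_cons_cons, List.countP_cons] at ihv ⊢
        have hb' : (x != y) = true := bne_iff_ne.mpr hxy
        rw [hb']
        simp only [Bool.false_eq_true, if_false, reduceIte] at ihv ⊢
        rw [List.toFinset_cons, Finset.card_insert_of_notMem (by simpa using hnm)]
        omega

theorem sorted_toFinset (nums : List Int) :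
    (PySem.List.sorted nums (fun x => x) false).toFinset = nums.toFinset := by
  ext x
  simp [List.mem_toFinset, PySem.List.mem_sorted]

-- ===== VERDICT (by name: the statement is the Claim_ definition above) =====
theorem solution_spec : Claim_equal_solution := by
  intro nums _
  unfold Spec_solution solution solution_alt
  simp only []
  rw [tmp_loop_eq_ofList, PySem.Set.ofList_ofList, ofList_length_eq_card]
  have hb := adjCount_sorted (PySem.List.sorted nums (fun x => x) false)
      (PySem.List.sorted_pairwise nums (fun x => x))
  rw [sorted_toFinset] at hb
  have hbz : (if (PySem.List.sorted nums (fun x => x) false).isEmpty then (0:Int)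
      else 1 + (((PySem.List.sorted nums (fun x => x) false).zip
        ((PySem.List.sorted nums (fun x => x) false).drop 1)).countP (fun p => p.1 != p.2) : Int))
      = (nums.toFinset.card : Int) := by
    cases h : (PySem.List.sorted nums (fun x => x) false).isEmpty <;>
      simp only [h, Bool.false_eq_true, if_false, if_true] at hb ⊢ <;> omega
  rw [hbz]
  split_ifs <;> omega
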